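-- pv_equiv track=rewrite | github.com/Charmander542/Senior-Design-Group-6-Braille | braille_converter/braille_map.py | dots_to_pattern
-- ===== SOURCE A (Python) =====
-- def dots_to_pattern(dots: list) -> str:
--     """
--     Convert a list of dot numbers to a visual pattern.
--
--     Args:
--         dots: List of dot numbers (1-6)
--
--     Returns:
--         A string representation of the dot pattern
--     """
--     pattern = [
--         ['○', '○'],  # Row 1: dots 1, 4
--         ['○', '○'],  # Row 2: dots 2, 5
--         ['○', '○']   # Row 3: dots 3, 6
--     ]
--
--     dot_positions = {
--         1: (0, 0), 2: (1, 0), 3: (2, 0),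
--         4: (0, 1), 5: (1, 1), 6: (2, 1)
--     }
--
--     for dot in dots:
--         if dot in dot_positions:
--             row, col = dot_positions[dot]
--             pattern[row][col] = '●'
--
--     return '\n'.join([' '.join(row) for row in pattern])
-- ===== SOURCE B (Python) =====
-- def dots_to_pattern(dots: list) -> str:
--     """Render the braille cell by looping over the three fixed rows instead of the input."""
--     present = set(dots)
--     rows = []
--     for r in range(3):
--         left = '●' if r + 1 in present else '○'
--         right = '●' if r + 4 in present else '○'
--         rows.append(' '.join([left, right]))
--     return '\n'.join(rows)
-- ===== Notes on version B (the rewrite author's own statement) =====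
-- stated objective: simpler
-- what changed: B drops A's mutable 3x2 grid and position dictionary: it builds a membership set once and iterates over the three fixed row indices, computing each cell directly from membership of r+1 and r+4.
import Mathlib
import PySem

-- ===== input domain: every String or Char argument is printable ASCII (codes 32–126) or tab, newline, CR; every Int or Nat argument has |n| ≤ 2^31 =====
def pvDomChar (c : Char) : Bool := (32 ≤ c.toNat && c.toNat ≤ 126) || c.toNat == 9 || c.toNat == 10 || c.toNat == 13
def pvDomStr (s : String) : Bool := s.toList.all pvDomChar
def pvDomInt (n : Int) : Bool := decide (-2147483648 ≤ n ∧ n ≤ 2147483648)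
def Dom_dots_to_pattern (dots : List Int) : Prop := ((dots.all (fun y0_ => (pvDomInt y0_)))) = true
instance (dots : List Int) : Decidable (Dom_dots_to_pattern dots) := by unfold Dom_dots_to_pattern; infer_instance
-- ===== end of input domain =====

-- B replaces A's mutable grid + position dict by a direct loop over the three row indices; objective: simpler.

-- ===== PORT A =====
def pvDotPos : PySem.Dict Int (Int × Int) :=
  PySem.Dict.ofList [(1,(0,0)),(2,(1,0)),(3,(2,0)),(4,(0,1)),(5,(1,1)),(6,(2,1))]

-- pattern[row][col] = x; exact here: row/col come from the dict and are literal in-range nonnegative indices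
def pvSetCell (p : List (List String)) (row col : Int) (x : String) : List (List String) :=
  p.set row.toNat ((p.getD row.toNat []).set col.toNat x)

def pvStepA (p : List (List String)) (dot : Int) : List (List String) :=
  match pvDotPos.get? dot with
  | some (row, col) => pvSetCell p row col "●"
  | none => p

def dots_to_pattern (dots : List Int) : String :=
  let pattern := dots.foldl pvStepA [["○","○"],["○","○"],["○","○"]]
  PySem.Str.join "\n" (pattern.map (fun row => PySem.Str.join " " row))

-- ===== PORT B =====
def pvCell (present : PySem.Set Int) (d : Int) : String :=
  if PySem.Set.contains present d then "●" else "○"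

def dots_to_pattern_alt (dots : List Int) : String :=
  let present := PySem.Set.ofList dots
  PySem.Str.join "\n" ((List.range 3).map (fun r =>
    PySem.Str.join " " [pvCell present ((r : Int) + 1), pvCell present ((r : Int) + 4)]))

-- ===== PRECONDITION & SPEC =====
def Spec_dots_to_pattern (dots : List Int) (out : String) : Prop := out = dots_to_pattern_alt dots
instance (dots : List Int) (out : String) : Decidable (Spec_dots_to_pattern dots out) := by unfold Spec_dots_to_pattern; infer_instance

-- ===== CLAIM (what is proved, stated in full; the proofs are below) =====
def Claim_equal_dots_to_pattern : Prop := ∀ (dots : List Int), Dom_dots_to_pattern dots → Spec_dots_to_pattern dots (dots_to_pattern dots)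

-- ===== LEMMAS AND PROOFS =====

-- cell value a dot k has at the end of A's loop, given its initial value s
def pvM (dots : List Int) (k : Int) (s : String) : String := if k ∈ dots then "●" else s

theorem pvDotPos_get (x : Int) : pvDotPos.get? x =
    if x = 1 then some ((0 : Int), (0 : Int)) else if x = 2 then some (1, 0)
    else if x = 3 then some (2, 0) else if x = 4 then some (0, 1)
    else if x = 5 then some (1, 1) else if x = 6 then some (2, 1) else none := by
  have h : pvDotPos = PySem.Dict.mk [(1,(0,0)),(2,(1,0)),(3,(2,0)),(4,(0,1)),(5,(1,1)),(6,(2,1))] := by decide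
  rw [h]
  simp only [PySem.Dict.get?_mk_cons]
  split_ifs <;> simp_all <;> rfl

theorem pvM_cons_ne (xs : List Int) (x k : Int) (s : String) (h : k ≠ x) :
    pvM (x :: xs) k s = pvM xs k s := by
  simp [pvM, List.mem_cons, h]

theorem foldA (dots : List Int) (a b c d e f : String) :
    dots.foldl pvStepA [[a, b], [c, d], [e, f]] =
      [[pvM dots 1 a, pvM dots 4 b], [pvM dots 2 c, pvM dots 5 d], [pvM dots 3 e, pvM dots 6 f]] := by
  induction dots generalizing a b c d e f with
  | nil => simp [pvM]
  | cons x xs ih =>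
    rw [List.foldl_cons]
    by_cases h1 : x = 1
    · subst h1
      show List.foldl pvStepA [["●", b], [c, d], [e, f]] xs = _
      rw [ih]
      simp [pvM, List.mem_cons]
    · by_cases h2 : x = 2
      · subst h2
        show List.foldl pvStepA [[a, b], ["●", d], [e, f]] xs = _
        rw [ih]
        simp [pvM, List.mem_cons]
      · by_cases h3 : x = 3
        · subst h3
          show List.foldl pvStepA [[a, b], [c, d], ["●", f]] xs = _
          rw [ih]
          simp [pvM, List.mem_cons]
        · by_cases h4 : x = 4
          · subst h4
            show List.foldl pvStepA [[a, "●"], [c, d], [e, f]] xs = _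
            rw [ih]
            simp [pvM, List.mem_cons]
          · by_cases h5 : x = 5
            · subst h5
              show List.foldl pvStepA [[a, b], [c, "●"], [e, f]] xs = _
              rw [ih]
              simp [pvM, List.mem_cons]
            · by_cases h6 : x = 6
              · subst h6
                show List.foldl pvStepA [[a, b], [c, d], [e, "●"]] xs = _
                rw [ih]
                simp [pvM, List.mem_cons]
              · have hstep : pvStepA [[a, b], [c, d], [e, f]] x = [[a, b], [c, d], [e, f]] := by
                  simp [pvStepA, pvDotPos_get, h1, h2, h3, h4, h5, h6]
                rw [hstep, ih]
                rw [pvM_cons_ne xs x 1 a (Ne.symm h1), pvM_cons_ne xs x 4 b (Ne.symm h4),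
                    pvM_cons_ne xs x 2 c (Ne.symm h2), pvM_cons_ne xs x 5 d (Ne.symm h5),
                    pvM_cons_ne xs x 3 e (Ne.symm h3), pvM_cons_ne xs x 6 f (Ne.symm h6)]

-- ===== VERDICT (by name: the statement is the Claim_ definition above) =====
theorem dots_to_pattern_spec : Claim_equal_dots_to_pattern := by
  intro dots _
  show dots_to_pattern dots = dots_to_pattern_alt dots
  unfold dots_to_pattern dots_to_pattern_alt
  rw [foldA]
  simp only [List.range_succ, List.range_zero, List.nil_append, List.cons_append,
    List.map_cons, List.map_nil, pvM, pvCell, PySem.Set.contains_eq_listContains,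
    List.contains_iff_mem]
  norm_num
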